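-- pv_equiv track=rewrite | github.com/zere-baizhan/Web-Dev | Lab7/codingbat/Warmup-2/string_match.py | string_match
-- ===== SOURCE A (Python) =====
-- def string_match(a, b):
--   shorter = min(len(a), len(b))
--   k = 0
--   for i in range(shorter-1):
--     a_sub = a[i:i+2]
--     b_sub = b[i:i+2]
--     if a_sub == b_sub:
--       k += 1
--   return k
-- ===== SOURCE B (Python) =====
-- def string_match(a, b):
--     m = [x == y for x, y in zip(a, b)]
--     return sum(1 if p and q else 0 for p, q in zip(m, m[1:]))
-- ===== Notes on version B (the rewrite author's own statement) =====
-- stated objective: alternative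
-- what changed: B precomputes a boolean per-position character-equality vector with zip and then counts consecutive True-True pairs over zip(m, m[1:]), instead of slicing and comparing length-2 substrings inside one indexed loop.
import Mathlib
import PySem

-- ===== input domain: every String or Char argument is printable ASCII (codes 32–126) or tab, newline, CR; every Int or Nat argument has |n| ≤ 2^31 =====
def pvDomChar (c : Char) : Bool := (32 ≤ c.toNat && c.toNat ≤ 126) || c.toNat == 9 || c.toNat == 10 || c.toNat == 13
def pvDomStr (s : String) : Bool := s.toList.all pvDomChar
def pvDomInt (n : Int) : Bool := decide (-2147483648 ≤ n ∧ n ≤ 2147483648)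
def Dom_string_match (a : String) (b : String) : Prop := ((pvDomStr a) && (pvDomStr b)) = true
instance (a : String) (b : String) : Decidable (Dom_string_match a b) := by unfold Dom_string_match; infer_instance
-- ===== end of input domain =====

-- B replaces A's indexed loop over length-2 slices by a per-position equality vector
-- (zip) followed by a count of consecutive True-True pairs; same cost, different decomposition.

-- ===== PORT A =====
def string_match (a : String) (b : String) : Int :=
  let shorter : Int := min (PySem.Str.len a) (PySem.Str.len b)
  (PySem.List.pyRange 0 (shorter - 1) 1).foldl
    (fun k i =>
      let a_sub := PySem.Str.slice a (some i) (some (i + 2))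
      let b_sub := PySem.Str.slice b (some i) (some (i + 2))
      if a_sub = b_sub then k + 1 else k) 0

-- ===== PORT B =====
def string_match_alt (a : String) (b : String) : Int :=
  let m : List Bool := List.zipWith (fun x y => x == y) a.toList b.toList
  ((List.zip m m.tail).map (fun pq => if pq.1 && pq.2 then (1 : Int) else 0)).sum

-- ===== PRECONDITION & SPEC =====
def Spec_string_match (a : String) (b : String) (out : Int) : Prop := out = string_match_alt a b
instance (a : String) (b : String) (out : Int) : Decidable (Spec_string_match a b out) := by unfold Spec_string_match; infer_instance

-- ===== CLAIM (what is proved, stated in full; the proofs are below) =====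
def Claim_equal_string_match : Prop := ∀ (a : String) (b : String), Dom_string_match a b → Spec_string_match a b (string_match a b)

-- ===== LEMMAS AND PROOFS =====

-- zip of a list with its tail, written as a map over indices
theorem zip_tail_eq_map_range {α : Type} (d : α) (m : List α) :
    List.zip m m.tail = (List.range (m.length - 1)).map (fun j => (m.getD j d, m.getD (j + 1) d)) := by
  induction m with
  | nil => simp
  | cons x xs ih =>
    cases xs with
    | nil => simp
    | cons y t =>
      simp only [List.tail_cons, List.zip_cons_cons, List.length_cons, Nat.add_sub_cancel]
      rw [List.range_succ_eq_map, List.map_cons, List.map_map]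
      simp only [List.tail_cons, List.length_cons, Nat.add_sub_cancel, List.zip_cons_cons] at ih
      refine List.cons_eq_cons.mpr ⟨by simp, ?_⟩
      rw [ih]
      apply List.map_congr_left
      intro j _
      simp [Function.comp, List.getD_cons_succ]

-- two consecutive elements as a take-2 of a drop
theorem drop_take_two {α : Type} (xs : List α) (j : Nat) (h : j + 1 < xs.length) :
    (xs.drop j).take 2 = [xs[j], xs[j + 1]] := by
  have h1 : xs.drop j = xs[j] :: xs.drop (j + 1) := List.drop_eq_getElem_cons (by omega)
  have h2 : xs.drop (j + 1) = xs[j + 1] :: xs.drop (j + 2) := List.drop_eq_getElem_cons h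
  rw [h1, h2]
  rfl

-- ===== VERDICT (by name: the statement is the Claim_ definition above) =====
theorem string_match_spec : Claim_equal_string_match := by
  intro a b _
  unfold Spec_string_match string_match string_match_alt
  dsimp only
  set la := a.toList with hla
  set lb := b.toList with hlb
  set n : Nat := min la.length lb.length with hn
  have hsh : min (PySem.Str.len a) (PySem.Str.len b) = (n : Int) := by
    simp only [PySem.Str.len_eq, hn, ← hla, ← hlb]
    omega
  rw [hsh]
  -- A side: count over indices
  have hconv : (fun (k i : Int) =>
      if PySem.Str.slice a (some i) (some (i + 2)) = PySem.Str.slice b (some i) (some (i + 2)) then k + 1 else k)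
      = (fun (k i : Int) =>
      if decide (PySem.Str.slice a (some i) (some (i + 2)) = PySem.Str.slice b (some i) (some (i + 2))) = true then k + 1 else k) := by
    funext k i; simp
  rw [hconv, PySem.List.foldl_count_if]
  rw [PySem.List.pyRange_one]
  rw [List.countP_map]
  -- B side: count over zipped pair list
  rw [PySem.List.sum_map_ite_one_zero]
  rw [zip_tail_eq_map_range false]
  rw [List.countP_map]
  have hm : (List.zipWith (fun x y => x == y) la lb).length = n := by
    simp [hn]
  rw [hm]
  have hrange : ((n : Int) - 1 - 0).toNat = n - 1 := by omega
  rw [hrange, zero_add]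
  congr 1
  apply List.countP_congr
  intro j hj
  have hjn : j < n - 1 := List.mem_range.mp hj
  have hja : j + 1 < la.length := by omega
  have hjb : j + 1 < lb.length := by omega
  have hza : (0 : Int) + (j : Int) = ((j : Nat) : Int) := by omega
  have hslice : ∀ (s : List Char) (hs : j + 1 < s.length),
      PySem.List.slice s (some ((j : Nat) : Int)) (some (((j : Nat) : Int) + 2)) = [s[j]'(by omega), s[j+1]'hs] := by
    intro s hs
    have h2 : ((j : Nat) : Int) + 2 = (((j + 2 : Nat)) : Int) := by omega
    rw [h2, PySem.List.slice_natCast]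
    rw [show j + 2 - j = 2 by omega]
    exact drop_take_two s j hs
  have hgetm : ∀ (i : Nat) (hia : i < la.length) (hib : i < lb.length),
      (List.zipWith (fun x y => x == y) la lb).getD i false = (la[i]'hia == lb[i]'hib) := by
    intro i hia hib
    rw [List.getD_eq_getElem _ _ (by rw [hm]; omega : i < (List.zipWith (fun x y => x == y) la lb).length)]
    simp
  simp only [Function.comp, hza]
  rw [hgetm j (by omega) (by omega), hgetm (j+1) (by omega) (by omega)]
  have hA : (PySem.Str.slice a (some ((j:Nat):Int)) (some (((j:Nat):Int) + 2)) =
             PySem.Str.slice b (some ((j:Nat):Int)) (some (((j:Nat):Int) + 2))) ↔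
            (la[j]'(by omega) = lb[j]'(by omega) ∧ la[j+1] = lb[j+1]) := by
    constructor
    · intro h
      have := congrArg String.toList h
      rw [PySem.Str.toList_slice, PySem.Str.toList_slice] at this
      simp only [PySem.Chars.slice_eq_listSlice, ← hla, ← hlb] at this
      rw [hslice la hja, hslice lb hjb] at this
      simpa using this
    · intro ⟨h1, h2⟩
      apply String.ext
      have : (PySem.Str.slice a (some ((j:Nat):Int)) (some (((j:Nat):Int) + 2))).toList =
             (PySem.Str.slice b (some ((j:Nat):Int)) (some (((j:Nat):Int) + 2))).toList := by
        rw [PySem.Str.toList_slice, PySem.Str.toList_slice]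
        simp only [PySem.Chars.slice_eq_listSlice, ← hla, ← hlb]
        rw [hslice la hja, hslice lb hjb, h1, h2]
      exact this
  simp [hA, decide_eq_true_eq, Bool.and_eq_true, beq_iff_eq]
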